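-- pv_equiv track=rewrite | github.com/M-Kovar/AdventOfCode2021 | Day05/day05.py | getDiagram
-- ===== SOURCE A (Python) =====
-- def getDiagram(linePoints):
--     diagram = initializeEmptyDiagram(linePoints)
--     for line in linePoints:
--         x1 = line[0][0]
--         y1 = line[0][1]
--         x2 = line[1][0]
--         y2 = line[1][1]
--         xStep = 1 if x1<=x2 else -1
--         yStep = 1 if y1<=y2 else -1
--         xCoords = list(range(x1,x2+xStep,xStep))
--         yCoords = list(range(y1,y2+yStep,yStep))
--         # Horizontal/vertical:
--         if x1==x2 or y1==y2:
--             for x in xCoords: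
--                 for y in yCoords:
--                     diagram[y][x] += 1
--         # Diagonal:
--         else:
--             for x,y in zip(xCoords,yCoords):
--                 diagram[y][x] += 1
--                 pass
--     return diagram
--
-- def initializeEmptyDiagram(linePoints):
--     #numRows = len(linePoints)
--     numCols = getMaxNumber(linePoints)+1
--     numRows = numCols
--     diagram = [ [0]*numCols for i in range(numRows)]
--     #diagram = [[0]*numCols]*numRows # Don't use this, it's a trap! This copies just a reference of the list being multiplied
--     return diagram
--
-- def getMaxNumber(linePoints):
--     return max(max(max(linePoints)))
-- ===== SOURCE B (Python) =====
-- def getDiagram(linePoints):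
--     # Two-stage pipeline: tally covered points in a dict keyed by (x, y), then
--     # paint the grid once, each distinct cell written with its multiplicity.
--     size = max(max(max(linePoints))) + 1
--     counts = {}
--     for line in linePoints:
--         x1, y1 = line[0][0], line[0][1]
--         x2, y2 = line[1][0], line[1][1]
--         dx, dy = x2 - x1, y2 - y1
--         sx = (dx > 0) - (dx < 0)
--         sy = (dy > 0) - (dy < 0)
--         n = abs(dy) if dx == 0 else abs(dx) if dy == 0 else min(abs(dx), abs(dy))
--         for i in range(n + 1):
--             p = (x1 + i * sx, y1 + i * sy)
--             counts[p] = counts.get(p, 0) + 1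
--     diagram = [[0] * size for _ in range(size)]
--     for (x, y), c in counts.items():
--         diagram[y][x] += c
--     return diagram
-- ===== Notes on version B (the rewrite author's own statement) =====
-- stated objective: alternative
-- what changed: A paints the grid in place, +1 per visited cell, through a horizontal/vertical-vs-diagonal branch with nested product loops and a zip loop; B is a two-stage pipeline that never increments the grid per visit: it tallies covered points into a dict keyed by (x, y) with a branch-free arithmetic stepper, then paints each distinct cell exactly once with its multiplicity.
import Mathlib
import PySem

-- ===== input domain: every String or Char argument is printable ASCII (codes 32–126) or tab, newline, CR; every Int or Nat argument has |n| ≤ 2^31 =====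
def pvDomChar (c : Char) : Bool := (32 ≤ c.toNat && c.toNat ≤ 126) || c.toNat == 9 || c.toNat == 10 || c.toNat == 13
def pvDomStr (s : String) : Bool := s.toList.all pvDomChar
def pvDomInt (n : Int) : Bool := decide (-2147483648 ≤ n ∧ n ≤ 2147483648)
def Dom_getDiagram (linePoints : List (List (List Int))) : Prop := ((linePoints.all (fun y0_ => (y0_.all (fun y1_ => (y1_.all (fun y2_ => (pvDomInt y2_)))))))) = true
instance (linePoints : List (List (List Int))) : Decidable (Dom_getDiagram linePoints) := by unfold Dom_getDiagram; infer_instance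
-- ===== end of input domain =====

-- One honest line: B replaces A's branchy paint-every-visit rasterization by a two-stage
-- pipeline — tally covered points in a dict, then paint each distinct cell once with its
-- multiplicity; objective: alternative (same cost, different data flow).

-- ===== PORT A =====
-- getMaxNumber: max(max(max(linePoints))); Python's max via PySem.List.maxD, list '<' is
-- Lean's lexicographic '<' on lists; default = empty-list input, excluded by Pre_
def pvMaxNumber (linePoints : List (List (List Int))) : Int :=
  PySem.List.maxD
    (PySem.List.maxD (PySem.List.maxD linePoints (fun x => x) []) (fun x => x) [])
    (fun x => x) 0

-- initializeEmptyDiagram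
def pvEmptyDiagram (linePoints : List (List (List Int))) : List (List Int) :=
  let numCols := pvMaxNumber linePoints + 1
  List.replicate numCols.toNat (List.replicate numCols.toNat (0 : Int))

-- diagram[y][x] += 1  (total form, exact under Pre_)
def pvBump (d : List (List Int)) (y x : Int) : List (List Int) :=
  PySem.List.pySetD d y
    (PySem.List.pySetD (PySem.List.pyGetD d y []) x
      (PySem.List.pyGetD (PySem.List.pyGetD d y []) x 0 + 1))

-- x1 = line[0][0]; y1 = line[0][1]; x2 = line[1][0]; y2 = line[1][1]  (same reads in A and B)
def pvXY (line : List (List Int)) : Int × Int × Int × Int :=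
  (PySem.List.pyGetD (PySem.List.pyGetD line 0 []) 0 0,
   PySem.List.pyGetD (PySem.List.pyGetD line 0 []) 1 0,
   PySem.List.pyGetD (PySem.List.pyGetD line 1 []) 0 0,
   PySem.List.pyGetD (PySem.List.pyGetD line 1 []) 1 0)

def pvStepA (d : List (List Int)) (line : List (List Int)) : List (List Int) :=
  let (x1, y1, x2, y2) := pvXY line
  let xStep : Int := if x1 ≤ x2 then 1 else -1
  let yStep : Int := if y1 ≤ y2 then 1 else -1
  let xCoords := PySem.List.pyRange x1 (x2 + xStep) xStep
  let yCoords := PySem.List.pyRange y1 (y2 + yStep) yStep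
  if x1 = x2 ∨ y1 = y2 then
    xCoords.foldl (fun d x => yCoords.foldl (fun d y => pvBump d y x) d) d
  else
    (xCoords.zip yCoords).foldl (fun d p => pvBump d p.2 p.1) d

def getDiagram (linePoints : List (List (List Int))) : List (List Int) :=
  linePoints.foldl pvStepA (pvEmptyDiagram linePoints)

-- ===== PORT B =====
-- counts[p] = counts.get(p, 0) + 1 over every covered point of a line (unified stepper)
def pvTallyLine (cnt : PySem.Dict (Int × Int) Int) (line : List (List Int)) :
    PySem.Dict (Int × Int) Int :=
  let (x1, y1, x2, y2) := pvXY line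
  let dx := x2 - x1
  let dy := y2 - y1
  let sx : Int := (if 0 < dx then 1 else 0) - (if dx < 0 then 1 else 0)
  let sy : Int := (if 0 < dy then 1 else 0) - (if dy < 0 then 1 else 0)
  let n : Int := if dx = 0 then |dy| else if dy = 0 then |dx| else min |dx| |dy|
  (PySem.List.pyRange 0 (n + 1) 1).foldl
    (fun cnt i =>
      let p := (x1 + i * sx, y1 + i * sy)
      cnt.insert p (cnt.getD p 0 + 1)) cnt

-- diagram[y][x] += c
def pvBumpBy (d : List (List Int)) (y x c : Int) : List (List Int) :=
  PySem.List.pySetD d y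
    (PySem.List.pySetD (PySem.List.pyGetD d y []) x
      (PySem.List.pyGetD (PySem.List.pyGetD d y []) x 0 + c))

def getDiagram_alt (linePoints : List (List (List Int))) : List (List Int) :=
  let size := pvMaxNumber linePoints + 1
  let counts := linePoints.foldl pvTallyLine PySem.Dict.empty
  let diagram := List.replicate size.toNat (List.replicate size.toNat (0 : Int))
  counts.items.foldl (fun d pc => pvBumpBy d pc.1.2 pc.1.1 pc.2) diagram

-- ===== PRECONDITION & SPEC =====
-- Pre_ = exactly the inputs where Python A returns: nonempty input, each line has two
-- points with both coordinates, and every grid cell a line touches indexes the diagram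
-- without IndexError (negative in-range indices wrap in both programs and stay inside).
def Pre_getDiagram (linePoints : List (List (List Int))) : Prop :=
  linePoints ≠ [] ∧
  ∀ line ∈ linePoints,
    2 ≤ line.length ∧
    2 ≤ (PySem.List.pyGetD line 0 []).length ∧
    2 ≤ (PySem.List.pyGetD line 1 []).length ∧
    (let (x1, y1, x2, y2) := pvXY line
     let dx := x2 - x1
     let dy := y2 - y1
     let sx : Int := (if 0 < dx then 1 else 0) - (if dx < 0 then 1 else 0)
     let sy : Int := (if 0 < dy then 1 else 0) - (if dy < 0 then 1 else 0)
     let n : Int := if dx = 0 then |dy| else if dy = 0 then |dx| else min |dx| |dy|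
     let N := pvMaxNumber linePoints + 1
     (-N ≤ x1 ∧ x1 < N) ∧ (-N ≤ x1 + n * sx ∧ x1 + n * sx < N) ∧
     (-N ≤ y1 ∧ y1 < N) ∧ (-N ≤ y1 + n * sy ∧ y1 + n * sy < N))

instance (linePoints : List (List (List Int))) : Decidable (Pre_getDiagram linePoints) := by
  unfold Pre_getDiagram; infer_instance

def pvWitness_getDiagram : List (List (List Int)) := [[[0, 0], [2, 2]]]

def Spec_getDiagram (linePoints : List (List (List Int))) (out : List (List Int)) : Prop := out = getDiagram_alt linePoints
instance (linePoints : List (List (List Int))) (out : List (List Int)) : Decidable (Spec_getDiagram linePoints out) := by unfold Spec_getDiagram; infer_instance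

-- ===== CLAIM (what is proved, stated in full; the proofs are below) =====
def Claim_equal_getDiagram : Prop := ∀ (linePoints : List (List (List Int))), Dom_getDiagram linePoints → Pre_getDiagram linePoints → Spec_getDiagram linePoints (getDiagram linePoints)

-- ===== LEMMAS AND PROOFS =====

-- the covered points of one line, in visit order (shared characterization of both loops)
def pvLinePts (line : List (List Int)) : List (Int × Int) :=
  let (x1, y1, x2, y2) := pvXY line
  let dx := x2 - x1
  let dy := y2 - y1
  let sx : Int := (if 0 < dx then 1 else 0) - (if dx < 0 then 1 else 0)
  let sy : Int := (if 0 < dy then 1 else 0) - (if dy < 0 then 1 else 0)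
  let n : Int := if dx = 0 then |dy| else if dy = 0 then |dx| else min |dx| |dy|
  (PySem.List.pyRange 0 (n + 1) 1).map (fun i => (x1 + i * sx, y1 + i * sy))

-- the flat list of all covered points
def pvAllPts (linePoints : List (List (List Int))) : List (Int × Int) :=
  linePoints.flatMap pvLinePts

-- Python's index wrap for an in-range index
def pvWrap (N : Nat) (i : Int) : Nat := if 0 ≤ i then i.toNat else (i + N).toNat

def pvShape (N : Nat) (g : List (List Int)) : Prop :=
  g.length = N ∧ ∀ r ∈ g, r.length = N

def pvCell (g : List (List Int)) (i j : Nat) : Int := (g.getD i []).getD j 0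

lemma zip_range' (a : Nat) : ∀ (b s : Nat), (List.range' s a).zip (List.range' s b) = (List.range' s (min a b)).map (fun i => (i, i)) := by
  induction a with
  | zero => intro b s; simp
  | succ n ih => intro b s; cases b with
    | zero => simp
    | succ m => simp [List.range'_succ, Nat.succ_min_succ, ih m (s+1)]

lemma zip_map_range (f g : Nat → Int) (m1 m2 : Nat) :
    ((List.range m1).map f).zip ((List.range m2).map g) = (List.range (min m1 m2)).map (fun k => (f k, g k)) := by
  rw [List.zip_map]
  simp only [List.range_eq_range']
  rw [zip_range' m1 m2 0, List.map_map]
  rfl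

lemma core (d : List (List Int)) (x1 y1 x2 y2 : Int) :
    (let xStep : Int := if x1 ≤ x2 then 1 else -1
     let yStep : Int := if y1 ≤ y2 then 1 else -1
     let xCoords := PySem.List.pyRange x1 (x2 + xStep) xStep
     let yCoords := PySem.List.pyRange y1 (y2 + yStep) yStep
     if x1 = x2 ∨ y1 = y2 then
       xCoords.foldl (fun d x => yCoords.foldl (fun d y => pvBump d y x) d) d
     else
       (xCoords.zip yCoords).foldl (fun d p => pvBump d p.2 p.1) d)
    = (let dx := x2 - x1
       let dy := y2 - y1
       let sx : Int := (if 0 < dx then 1 else 0) - (if dx < 0 then 1 else 0)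
       let sy : Int := (if 0 < dy then 1 else 0) - (if dy < 0 then 1 else 0)
       let n : Int := if dx = 0 then |dy| else if dy = 0 then |dx| else min |dx| |dy|
       (PySem.List.pyRange 0 (n + 1) 1).foldl (fun d i => pvBump d (y1 + i * sy) (x1 + i * sx)) d) := by
  simp only []
  rcases lt_trichotomy x1 x2 with hx | hx | hx
  · rcases lt_trichotomy y1 y2 with hy | hy | hy
    · -- diag up-right
      have h1 : ¬ x1 = x2 := hx.ne
      have h2 : ¬ y1 = y2 := hy.ne
      simp only [hx.le, hy.le, if_true, if_pos, h1, h2, or_self, if_false,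
        show (0:Int) < x2 - x1 by omega, show ¬ (x2 - x1 < 0) by omega, show ¬ (x2 - x1 = 0) by omega,
        show (0:Int) < y2 - y1 by omega, show ¬ (y2 - y1 < 0) by omega, show ¬ (y2 - y1 = 0) by omega,
        abs_of_pos, or_false]
      rw [PySem.List.pyRange_one x1, PySem.List.pyRange_one y1, PySem.List.pyRange_one 0,
        zip_map_range, List.foldl_map, List.foldl_map]
      have hm : min (x2 + 1 - x1).toNat (y2 + 1 - y1).toNat = (min (x2 - x1) (y2 - y1) + 1 - 0).toNat := by omega
      rw [hm]
      apply List.foldl_ext; intro a k _; simp; try ring_nf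
    · -- horizontal right
      subst hy
      simp only [hx.le, le_refl, if_true, hx.ne, or_true, if_pos, sub_self,
        show (0:Int) < x2 - x1 by omega, show ¬ (x2 - x1 < 0) by omega, show ¬ (x2 - x1 = 0) by omega,
        lt_irrefl, if_false, abs_of_pos]
      rw [PySem.List.pyRange_one_singleton, PySem.List.pyRange_one x1, PySem.List.pyRange_one 0,
        List.foldl_map, List.foldl_map]
      have hm : (x2 + 1 - x1).toNat = (x2 - x1 + 1 - 0).toNat := by omega
      rw [hm]
      apply List.foldl_ext; intro a k _; simp
    · -- diag down-right
      have h1 : ¬ x1 = x2 := hx.ne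
      have h2 : ¬ y1 = y2 := hy.ne'
      simp only [hx.le, if_true, if_pos, h1, h2, or_self, if_false, not_le.2 hy, or_false,
        show (0:Int) < x2 - x1 by omega, show ¬ (x2 - x1 < 0) by omega, show ¬ (x2 - x1 = 0) by omega,
        show ¬ ((0:Int) < y2 - y1) by omega, show (y2 - y1 : Int) < 0 by omega, show ¬ (y2 - y1 = 0) by omega,
        abs_of_pos, abs_of_neg]
      rw [PySem.List.pyRange_one x1, PySem.List.pyRange_neg_one y1, PySem.List.pyRange_one 0,
        zip_map_range, List.foldl_map, List.foldl_map]
      have hm : min (x2 + 1 - x1).toNat (y1 - (y2 + -1)).toNat = (min (x2 - x1) (-(y2 - y1)) + 1 - 0).toNat := by omega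
      rw [hm]
      apply List.foldl_ext; intro a k _; simp; try ring_nf
  · rcases lt_trichotomy y1 y2 with hy | hy | hy
    · -- vertical up
      subst hx
      simp only [le_refl, hy.le, if_true, hy.ne, true_or, if_pos, sub_self, lt_irrefl, if_false,
        show (0:Int) < y2 - y1 by omega, show ¬ (y2 - y1 < 0) by omega, show ¬ (y2 - y1 = 0) by omega,
        abs_of_pos]
      rw [PySem.List.pyRange_one_singleton, PySem.List.pyRange_one y1, PySem.List.pyRange_one 0,
        List.foldl_cons, List.foldl_nil, List.foldl_map, List.foldl_map]
      have hm : (y2 + 1 - y1).toNat = (y2 - y1 + 1 - 0).toNat := by omega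
      rw [hm]
      apply List.foldl_ext; intro a k _; simp
    · -- point
      subst hx; subst hy
      simp only [le_refl, if_true, true_or, if_pos, sub_self, lt_irrefl, if_false, abs_zero]
      rw [PySem.List.pyRange_one_singleton, PySem.List.pyRange_one_singleton,
        show (0:Int) + 1 = 0 + 1 by rfl, PySem.List.pyRange_one_singleton]
      simp
    · -- vertical down
      subst hx
      simp only [le_refl, not_le.2 hy, if_true, if_false, hy.ne', true_or, if_pos, sub_self, lt_irrefl,
        show ¬ ((0:Int) < y2 - y1) by omega, show (y2 - y1 : Int) < 0 by omega, show ¬ (y2 - y1 = 0) by omega,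
        abs_of_neg]
      rw [PySem.List.pyRange_one_singleton, PySem.List.pyRange_neg_one y1, PySem.List.pyRange_one 0,
        List.foldl_cons, List.foldl_nil, List.foldl_map, List.foldl_map]
      have hm : (y1 - (y2 + -1)).toNat = (-(y2 - y1) + 1 - 0).toNat := by omega
      rw [hm]
      apply List.foldl_ext; intro a k _; simp; try ring_nf
  · rcases lt_trichotomy y1 y2 with hy | hy | hy
    · -- diag up-left
      have h1 : ¬ x1 = x2 := hx.ne'
      have h2 : ¬ y1 = y2 := hy.ne
      simp only [not_le.2 hx, hy.le, if_true, if_false, h1, h2, or_self, if_pos, or_false,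
        show ¬ ((0:Int) < x2 - x1) by omega, show (x2 - x1 : Int) < 0 by omega, show ¬ (x2 - x1 = 0) by omega,
        show (0:Int) < y2 - y1 by omega, show ¬ (y2 - y1 < 0) by omega, show ¬ (y2 - y1 = 0) by omega,
        abs_of_pos, abs_of_neg]
      rw [PySem.List.pyRange_neg_one x1, PySem.List.pyRange_one y1, PySem.List.pyRange_one 0,
        zip_map_range, List.foldl_map, List.foldl_map]
      have hm : min (x1 - (x2 + -1)).toNat (y2 + 1 - y1).toNat = (min (-(x2 - x1)) (y2 - y1) + 1 - 0).toNat := by omega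
      rw [hm]
      apply List.foldl_ext; intro a k _; simp; try ring_nf
    · -- horizontal left
      subst hy
      simp only [not_le.2 hx, le_refl, if_true, if_false, hx.ne', or_true, if_pos, sub_self, lt_irrefl,
        show ¬ ((0:Int) < x2 - x1) by omega, show (x2 - x1 : Int) < 0 by omega, show ¬ (x2 - x1 = 0) by omega,
        abs_of_neg]
      rw [PySem.List.pyRange_one_singleton, PySem.List.pyRange_neg_one x1, PySem.List.pyRange_one 0,
        List.foldl_map, List.foldl_map]
      have hm : (x1 - (x2 + -1)).toNat = (-(x2 - x1) + 1 - 0).toNat := by omega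
      rw [hm]
      apply List.foldl_ext; intro a k _; simp; try ring_nf
    · -- diag down-left
      have h1 : ¬ x1 = x2 := hx.ne'
      have h2 : ¬ y1 = y2 := hy.ne'
      simp only [not_le.2 hx, not_le.2 hy, if_false, h1, h2, or_self, if_pos,
        show ¬ ((0:Int) < x2 - x1) by omega, show (x2 - x1 : Int) < 0 by omega, show ¬ (x2 - x1 = 0) by omega,
        show ¬ ((0:Int) < y2 - y1) by omega, show (y2 - y1 : Int) < 0 by omega, show ¬ (y2 - y1 = 0) by omega,
        abs_of_neg, or_false]
      rw [PySem.List.pyRange_neg_one x1, PySem.List.pyRange_neg_one y1, PySem.List.pyRange_one 0,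
        zip_map_range, List.foldl_map, List.foldl_map]
      have hm : min (x1 - (x2 + -1)).toNat (y1 - (y2 + -1)).toNat = (min (-(x2 - x1)) (-(y2 - y1)) + 1 - 0).toNat := by omega
      rw [hm]
      apply List.foldl_ext; intro a k _; simp; try ring_nf

-- A's per-line painting is a bump per covered point, in visit order
lemma stepA_pts (d : List (List Int)) (line : List (List Int)) :
    pvStepA d line = (pvLinePts line).foldl (fun d p => pvBump d p.2 p.1) d := by
  unfold pvStepA pvLinePts
  rcases pvXY line with ⟨x1, y1, x2, y2⟩
  rw [List.foldl_map]
  exact core d x1 y1 x2 y2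

-- B's per-line tally is the counter update per covered point, in visit order
lemma tally_pts (cnt : PySem.Dict (Int × Int) Int) (line : List (List Int)) :
    pvTallyLine cnt line = (pvLinePts line).foldl (fun c p => c.insert p (c.getD p 0 + 1)) cnt := by
  unfold pvTallyLine pvLinePts
  rcases pvXY line with ⟨x1, y1, x2, y2⟩
  rw [List.foldl_map]

-- A is the bump fold over the flat point list
lemma getDiagram_eq_fold (lp : List (List (List Int))) :
    getDiagram lp = (pvAllPts lp).foldl (fun d p => pvBump d p.2 p.1) (pvEmptyDiagram lp) := by
  unfold getDiagram pvAllPts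
  rw [List.foldl_flatMap]
  apply PySem.List.foldl_congr_mem
  intro d line _
  exact stepA_pts d line

-- B's dict is Counter(all points)
lemma counts_eq_counter (lp : List (List (List Int))) :
    lp.foldl pvTallyLine PySem.Dict.empty = PySem.Dict.counter (pvAllPts lp) := by
  unfold pvAllPts
  rw [← PySem.Dict.foldl_insert_getD_add_one_eq_counter, List.foldl_flatMap]
  apply PySem.List.foldl_congr_mem
  intro c line _
  exact tally_pts c line

-- wrap/in-range forms of the primitives
lemma pySetD_inrange {α : Type} (xs : List α) (i : Int) (v : α)
    (h1 : -(xs.length : Int) ≤ i) (h2 : i < xs.length) :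
    PySem.List.pySetD xs i v = xs.set (pvWrap xs.length i) v := by
  unfold PySem.List.pySetD PySem.List.pySet? PySem.List.pyIdx? pvWrap
  by_cases h : 0 ≤ i
  · simp [h, h2]
  · have heq : xs.length - (-i).toNat = (i + xs.length).toNat := by omega
    simp [h, h1, heq]

lemma pyGetD_inrange {α : Type} (xs : List α) (i : Int) (d : α)
    (h1 : -(xs.length : Int) ≤ i) (h2 : i < xs.length) :
    PySem.List.pyGetD xs i d = xs.getD (pvWrap xs.length i) d := by
  unfold PySem.List.pyGetD PySem.List.pyGet? PySem.List.pyIdx? pvWrap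
  by_cases h : 0 ≤ i
  · have hlt : i.toNat < xs.length := by omega
    simp [h, h2, List.getD_eq_getElem _ _ hlt, List.getElem?_eq_getElem hlt]
  · have heq : xs.length - (-i).toNat = (i + xs.length).toNat := by omega
    have hlt : (i + xs.length).toNat < xs.length := by omega
    simp [h, h1, heq, List.getElem?_eq_getElem hlt]

lemma pvWrap_lt {N : Nat} {t : Int} (h1 : -(N : Int) ≤ t) (h2 : t < N) : pvWrap N t < N := by
  unfold pvWrap; split <;> omega

-- the bump at an in-range (possibly negative, wrapping) index, in Nat-indexed form
lemma bumpBy_eq {N : Nat} {g : List (List Int)} (hg : pvShape N g) (y x c : Int)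
    (hy1 : -(N : Int) ≤ y) (hy2 : y < N) (hx1 : -(N : Int) ≤ x) (hx2 : x < N) :
    pvBumpBy g y x c =
      g.set (pvWrap N y) ((g.getD (pvWrap N y) []).set (pvWrap N x)
        ((g.getD (pvWrap N y) []).getD (pvWrap N x) 0 + c)) := by
  obtain ⟨hlen, hrows⟩ := hg
  have hrow_len : (g.getD (pvWrap N y) []).length = N := by
    have hiy : pvWrap N y < g.length := by rw [hlen]; exact pvWrap_lt hy1 hy2
    rw [List.getD_eq_getElem _ _ hiy]
    exact hrows _ (List.getElem_mem hiy)
  unfold pvBumpBy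
  rw [pyGetD_inrange g y [] (by rw [hlen]; exact hy1) (by rw [hlen]; exact hy2), hlen,
    pyGetD_inrange _ x 0 (by rw [hrow_len]; exact hx1) (by rw [hrow_len]; exact hx2),
    pySetD_inrange _ x _ (by rw [hrow_len]; exact hx1) (by rw [hrow_len]; exact hx2),
    pySetD_inrange g y _ (by rw [hlen]; exact hy1) (by rw [hlen]; exact hy2),
    hlen, hrow_len]

-- one multiplicity-bump: shape preserved, one cell raised
lemma bumpBy_shape {N : Nat} {g : List (List Int)} (hg : pvShape N g) (y x c : Int)
    (hy1 : -(N : Int) ≤ y) (hy2 : y < N) (hx1 : -(N : Int) ≤ x) (hx2 : x < N) :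
    pvShape N (pvBumpBy g y x c) := by
  obtain ⟨hlen, hrows⟩ := hg
  rw [bumpBy_eq ⟨hlen, hrows⟩ y x c hy1 hy2 hx1 hx2]
  refine ⟨by simp [hlen], ?_⟩
  intro r hr
  rcases List.mem_or_eq_of_mem_set hr with h | h
  · exact hrows r h
  · subst h
    rw [List.length_set]
    have hiy : pvWrap N y < g.length := by rw [hlen]; exact pvWrap_lt hy1 hy2
    rw [List.getD_eq_getElem _ _ hiy]
    exact hrows _ (List.getElem_mem hiy)

lemma bumpBy_cell {N : Nat} {g : List (List Int)} (hg : pvShape N g) (y x c : Int)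
    (hy1 : -(N : Int) ≤ y) (hy2 : y < N) (hx1 : -(N : Int) ≤ x) (hx2 : x < N)
    (i j : Nat) (hi : i < N) (hj : j < N) :
    pvCell (pvBumpBy g y x c) i j =
      pvCell g i j + (if pvWrap N y = i ∧ pvWrap N x = j then c else 0) := by
  obtain ⟨hlen, hrows⟩ := hg
  have hiyN : pvWrap N y < N := pvWrap_lt hy1 hy2
  have hjxN : pvWrap N x < N := pvWrap_lt hx1 hx2
  have hiy : pvWrap N y < g.length := by omega
  have hrow_len : (g.getD (pvWrap N y) []).length = N := by
    rw [List.getD_eq_getElem _ _ hiy]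
    exact hrows _ (List.getElem_mem hiy)
  rw [bumpBy_eq ⟨hlen, hrows⟩ y x c hy1 hy2 hx1 hx2]
  unfold pvCell
  have hig : i < g.length := by omega
  have hig' : i < (g.set (pvWrap N y)
      ((g.getD (pvWrap N y) []).set (pvWrap N x)
        ((g.getD (pvWrap N y) []).getD (pvWrap N x) 0 + c))).length := by
    rw [List.length_set]; exact hig
  rw [List.getD_eq_getElem _ _ hig', List.getElem_set]
  by_cases hyi : pvWrap N y = i
  · rw [if_pos hyi]
    have hjrow : j < (g.getD (pvWrap N y) []).length := by omega
    have hjrow' : j < ((g.getD (pvWrap N y) []).set (pvWrap N x)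
        ((g.getD (pvWrap N y) []).getD (pvWrap N x) 0 + c)).length := by
      rw [List.length_set]; exact hjrow
    rw [List.getD_eq_getElem _ _ hjrow', List.getElem_set]
    have hgi : g.getD i [] = g.getD (pvWrap N y) [] := by rw [hyi]
    by_cases hxj : pvWrap N x = j
    · rw [if_pos hxj, if_pos ⟨hyi, hxj⟩, hgi, hxj]
    · rw [if_neg hxj, if_neg (by tauto), hgi,
        List.getD_eq_getElem _ _ hjrow]
      omega
  · rw [if_neg hyi, if_neg (by tauto), List.getD_eq_getElem _ _ hig]
    omega

-- the master fold: painting a list of (point, multiplicity) pairs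
lemma paint_fold (N : Nat) (ps : List ((Int × Int) × Int)) :
    ∀ g : List (List Int), pvShape N g →
    (∀ q ∈ ps, (-(N : Int) ≤ q.1.1 ∧ q.1.1 < N) ∧ (-(N : Int) ≤ q.1.2 ∧ q.1.2 < N)) →
    pvShape N (ps.foldl (fun d q => pvBumpBy d q.1.2 q.1.1 q.2) g) ∧
    ∀ i j : Nat, i < N → j < N →
      pvCell (ps.foldl (fun d q => pvBumpBy d q.1.2 q.1.1 q.2) g) i j =
        pvCell g i j +
          ((ps.filter (fun q => pvWrap N q.1.2 == i && pvWrap N q.1.1 == j)).map (·.2)).sum := by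
  induction ps with
  | nil => intro g hg _; exact ⟨hg, fun i j _ _ => by simp⟩
  | cons q ps ih =>
    intro g hg hin
    obtain ⟨⟨hqx1, hqx2⟩, hqy1, hqy2⟩ := hin q (List.mem_cons_self ..)
    have hin' : ∀ q' ∈ ps, (-(N : Int) ≤ q'.1.1 ∧ q'.1.1 < N) ∧ (-(N : Int) ≤ q'.1.2 ∧ q'.1.2 < N) :=
      fun q' hq' => hin q' (List.mem_cons_of_mem _ hq')
    have hg' : pvShape N (pvBumpBy g q.1.2 q.1.1 q.2) := bumpBy_shape hg _ _ _ hqy1 hqy2 hqx1 hqx2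
    obtain ⟨hshape, hcells⟩ := ih (pvBumpBy g q.1.2 q.1.1 q.2) hg' hin'
    refine ⟨by simpa using hshape, ?_⟩
    intro i j hi hj
    rw [List.foldl_cons, hcells i j hi hj,
      bumpBy_cell hg _ _ _ hqy1 hqy2 hqx1 hqx2 i j hi hj, List.filter_cons]
    by_cases hq : pvWrap N q.1.2 = i ∧ pvWrap N q.1.1 = j
    · rw [if_pos hq, if_pos (by simp [hq])]
      simp only [List.map_cons, List.sum_cons]
      ring
    · rw [if_neg hq, if_neg (by simpa using hq)]
      ring

-- indicator sums over a duplicate-free key list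
lemma indicator_sum_not_mem (q : (Int × Int) → Bool) (p : Int × Int) :
    ∀ ks : List (Int × Int), p ∉ ks →
    (((ks.filter q).map (fun k => if k = p then (1 : Int) else 0)).sum) = 0 := by
  intro ks hp
  induction ks with
  | nil => simp
  | cons k ks ih =>
    have hk : k ≠ p := fun h => hp (h ▸ List.mem_cons_self ..)
    have hp' : p ∉ ks := fun h => hp (List.mem_cons_of_mem _ h)
    rw [List.filter_cons]
    split
    · simp [hk, ih hp']
    · exact ih hp'

lemma indicator_sum (q : (Int × Int) → Bool) (p : Int × Int) :
    ∀ ks : List (Int × Int), ks.Nodup → p ∈ ks →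
    (((ks.filter q).map (fun k => if k = p then (1 : Int) else 0)).sum) = if q p then 1 else 0 := by
  intro ks hnd hp
  induction ks with
  | nil => cases hp
  | cons k ks ih =>
    rw [List.nodup_cons] at hnd
    rcases List.mem_cons.1 hp with h | h
    · subst h
      rw [List.filter_cons]
      by_cases hq : q p
      · simp [hq, indicator_sum_not_mem q p ks hnd.1]
      · simp [hq, indicator_sum_not_mem q p ks hnd.1]
    · have hkp : k ≠ p := fun he => hnd.1 (he ▸ h)
      rw [List.filter_cons]
      split
      · simp only [List.map_cons, List.sum_cons, if_neg hkp, zero_add]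
        exact ih hnd.2 h
      · exact ih hnd.2 h

-- sum of per-distinct-point counts = plain count of matching points
lemma dedup_count_sum (q : (Int × Int) → Bool) :
    ∀ (P : List (Int × Int)) (ks : List (Int × Int)), ks.Nodup → (∀ p ∈ P, p ∈ ks) →
    ((ks.filter q).map (fun k => (P.count k : Int))).sum = (P.countP q : Int) := by
  intro P
  induction P with
  | nil => intro ks _ _; simp
  | cons p P ih =>
    intro ks hnd hmem
    have hmem' : ∀ x ∈ P, x ∈ ks := fun x hx => hmem x (List.mem_cons_of_mem _ hx)
    have hsplit : ∀ k : Int × Int,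
        ((p :: P).count k : Int) = (P.count k : Int) + (if k = p then (1 : Int) else 0) := by
      intro k
      rw [List.count_cons]
      by_cases h : k = p
      · simp [h]
      · simp [h, (show ¬ p = k from fun he => h he.symm)]
    calc ((ks.filter q).map (fun k => ((p :: P).count k : Int))).sum
        = ((ks.filter q).map (fun k => (P.count k : Int) + (if k = p then (1 : Int) else 0))).sum := by
          exact congrArg List.sum (List.map_congr_left (fun k _ => hsplit k))
      _ = ((ks.filter q).map (fun k => (P.count k : Int))).sum
            + ((ks.filter q).map (fun k => if k = p then (1 : Int) else 0)).sum := by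
          rw [← List.sum_map_add]
      _ = (P.countP q : Int) + (if q p then 1 else 0) := by
          rw [ih ks hnd hmem', indicator_sum q p ks hnd (hmem p (List.mem_cons_self ..))]
      _ = ((p :: P).countP q : Int) := by
          rw [List.countP_cons]
          by_cases h : q p <;> simp [h]

-- a point i steps along a unit-step segment stays between the segment's two ends
lemma seg_bound (x1 n s i M : Int) (hs : s = 1 ∨ s = 0 ∨ s = -1) (hi0 : 0 ≤ i) (hin : i ≤ n)
    (h1 : -M ≤ x1) (h2 : x1 < M) (h3 : -M ≤ x1 + n * s) (h4 : x1 + n * s < M) :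
    -M ≤ x1 + i * s ∧ x1 + i * s < M := by
  rcases hs with rfl | rfl | rfl <;> constructor <;> omega

lemma sum_ones (l : List (Int × Int)) : (l.map (fun _ => (1 : Int))).sum = l.length := by
  induction l with
  | nil => rfl
  | cons a l ih => simp only [List.map_cons, List.sum_cons, ih, List.length_cons]; push_cast; ring

-- every covered point of a line admitted by Pre_ indexes the diagram in range
lemma pts_in_range (lp : List (List (List Int))) (hpre : Pre_getDiagram lp) :
    ∀ p ∈ pvAllPts lp,
      (-(pvMaxNumber lp + 1) ≤ p.1 ∧ p.1 < pvMaxNumber lp + 1) ∧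
      (-(pvMaxNumber lp + 1) ≤ p.2 ∧ p.2 < pvMaxNumber lp + 1) := by
  intro p hp
  obtain ⟨-, hcl⟩ := hpre
  rcases List.mem_flatMap.1 hp with ⟨line, hline, hpl⟩
  obtain ⟨-, -, -, hbounds⟩ := hcl line hline
  revert hbounds hpl
  unfold pvLinePts
  rcases pvXY line with ⟨x1, y1, x2, y2⟩
  simp only []
  intro hpl hbounds
  rcases List.mem_map.1 hpl with ⟨i, hi, rfl⟩
  rw [PySem.List.mem_pyRange_one] at hi
  obtain ⟨hb1, hb2, hb3, hb4⟩ := hbounds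
  constructor
  · exact seg_bound _ _ _ i _ (by split_ifs <;> norm_num) hi.1 (by omega) hb1.1 hb1.2 hb2.1 hb2.2
  · exact seg_bound _ _ _ i _ (by split_ifs <;> norm_num) hi.1 (by omega) hb3.1 hb3.2 hb4.1 hb4.2

lemma main_eq (lp : List (List (List Int))) (hpre : Pre_getDiagram lp) :
    getDiagram lp = getDiagram_alt lp := by
  obtain ⟨hne, hcl⟩ := hpre
  set N : Nat := (pvMaxNumber lp + 1).toNat with hN
  have hMpos : 0 < pvMaxNumber lp + 1 := by
    rcases lp with - | ⟨line, rest⟩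
    · exact absurd rfl hne
    · obtain ⟨-, -, -, hb⟩ := hcl line (List.mem_cons_self ..)
      revert hb
      rcases pvXY line with ⟨x1, y1, x2, y2⟩
      simp only []
      intro hb
      obtain ⟨⟨h1, h2⟩, -⟩ := hb
      omega
  have hNM : (N : Int) = pvMaxNumber lp + 1 := by omega
  have hptsN : ∀ p ∈ pvAllPts lp, (-(N : Int) ≤ p.1 ∧ p.1 < N) ∧ (-(N : Int) ≤ p.2 ∧ p.2 < N) := by
    intro p hp
    have h := pts_in_range lp ⟨hne, hcl⟩ p hp
    rw [hNM]
    exact h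
  -- the empty diagram: shape N, all cells 0
  have hEdef : pvEmptyDiagram lp = List.replicate N (List.replicate N (0 : Int)) := by
    unfold pvEmptyDiagram
    rw [hN]
  have hEsh : pvShape N (pvEmptyDiagram lp) := by
    rw [hEdef]
    refine ⟨List.length_replicate, ?_⟩
    intro r hr
    rw [List.eq_of_mem_replicate hr]
    exact List.length_replicate
  have hEcell : ∀ i j : Nat, i < N → j < N → pvCell (pvEmptyDiagram lp) i j = 0 := by
    intro i j hi hj
    unfold pvCell
    rw [hEdef, List.getD_eq_getElem (List.replicate N (List.replicate N (0 : Int))) []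
      (by simpa using hi), List.getElem_replicate]
    rw [List.getD_eq_getElem _ _ (by simpa using hj), List.getElem_replicate]
  -- both programs as multiplicity-paint folds over the same flat point list
  have hA : getDiagram lp =
      ((pvAllPts lp).map (fun p => (p, (1 : Int)))).foldl
        (fun d q => pvBumpBy d q.1.2 q.1.1 q.2) (pvEmptyDiagram lp) := by
    rw [getDiagram_eq_fold, List.foldl_map]
    rfl
  have hB : getDiagram_alt lp =
      ((PySem.Set.ofList (pvAllPts lp)).map
        (fun k => (k, (List.count k (pvAllPts lp) : Int)))).foldl
        (fun d q => pvBumpBy d q.1.2 q.1.1 q.2) (pvEmptyDiagram lp) := by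
    have hB0 : getDiagram_alt lp =
        (lp.foldl pvTallyLine PySem.Dict.empty).items.foldl
          (fun d pc => pvBumpBy d pc.1.2 pc.1.1 pc.2)
          (List.replicate (pvMaxNumber lp + 1).toNat
            (List.replicate (pvMaxNumber lp + 1).toNat (0 : Int))) := rfl
    have hE0 : pvEmptyDiagram lp =
        List.replicate (pvMaxNumber lp + 1).toNat
          (List.replicate (pvMaxNumber lp + 1).toNat (0 : Int)) := rfl
    rw [hB0, counts_eq_counter, PySem.Dict.items_counter, ← hE0]
  have hbA : ∀ q ∈ (pvAllPts lp).map (fun p => (p, (1 : Int))),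
      (-(N : Int) ≤ q.1.1 ∧ q.1.1 < N) ∧ (-(N : Int) ≤ q.1.2 ∧ q.1.2 < N) := by
    intro q hq
    rcases List.mem_map.1 hq with ⟨p, hp, rfl⟩
    exact hptsN p hp
  have hbB : ∀ q ∈ (PySem.Set.ofList (pvAllPts lp)).map
      (fun k => (k, (List.count k (pvAllPts lp) : Int))),
      (-(N : Int) ≤ q.1.1 ∧ q.1.1 < N) ∧ (-(N : Int) ≤ q.1.2 ∧ q.1.2 < N) := by
    intro q hq
    rcases List.mem_map.1 hq with ⟨p, hp, rfl⟩
    exact hptsN p ((PySem.Set.mem_ofList _ _).1 hp)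
  obtain ⟨hshA, hcellA⟩ := paint_fold N _ (pvEmptyDiagram lp) hEsh hbA
  obtain ⟨hshB, hcellB⟩ := paint_fold N _ (pvEmptyDiagram lp) hEsh hbB
  rw [hA, hB]
  -- per-cell equality of the two painted grids
  have hcells : ∀ i j : Nat, i < N → j < N →
      pvCell (((pvAllPts lp).map (fun p => (p, (1 : Int)))).foldl
        (fun d q => pvBumpBy d q.1.2 q.1.1 q.2) (pvEmptyDiagram lp)) i j =
      pvCell (((PySem.Set.ofList (pvAllPts lp)).map
        (fun k => (k, (List.count k (pvAllPts lp) : Int)))).foldl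
        (fun d q => pvBumpBy d q.1.2 q.1.1 q.2) (pvEmptyDiagram lp)) i j := by
    intro i j hi hj
    rw [hcellA i j hi hj, hcellB i j hi hj, hEcell i j hi hj]
    congr 1
    rw [List.filter_map, List.filter_map, List.map_map, List.map_map]
    have e1 : ((fun q : (Int × Int) × Int => pvWrap N q.1.2 == i && pvWrap N q.1.1 == j) ∘
        (fun p : Int × Int => (p, (1 : Int)))) =
        (fun p : Int × Int => pvWrap N p.2 == i && pvWrap N p.1 == j) := rfl
    have e2 : ((fun q : (Int × Int) × Int => pvWrap N q.1.2 == i && pvWrap N q.1.1 == j) ∘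
        (fun k : Int × Int => (k, (List.count k (pvAllPts lp) : Int)))) =
        (fun p : Int × Int => pvWrap N p.2 == i && pvWrap N p.1 == j) := rfl
    rw [e1, e2]
    have e3 : ((fun x : (Int × Int) × Int => x.2) ∘ (fun p : Int × Int => (p, (1 : Int)))) =
        (fun _ : Int × Int => (1 : Int)) := rfl
    have e4 : ((fun x : (Int × Int) × Int => x.2) ∘
        (fun k : Int × Int => (k, (List.count k (pvAllPts lp) : Int)))) =
        (fun k : Int × Int => (List.count k (pvAllPts lp) : Int)) := rfl
    rw [e3, e4, sum_ones,
      dedup_count_sum (fun p : Int × Int => pvWrap N p.2 == i && pvWrap N p.1 == j)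
        (pvAllPts lp) (PySem.Set.ofList (pvAllPts lp)) (PySem.Set.nodup_ofList _)
        (fun p hp => (PySem.Set.mem_ofList _ _).2 hp),
      ← List.countP_eq_length_filter]
  -- assemble the grids
  apply List.ext_getElem
  · rw [hshA.1, hshB.1]
  · intro i h1 h2
    have hiN : i < N := by rw [← hshA.1]; exact h1
    have hrowA : _ ∈ _ := List.getElem_mem h1
    have hrowB : _ ∈ _ := List.getElem_mem h2
    have hlenA := hshA.2 _ hrowA
    have hlenB := hshB.2 _ hrowB
    apply List.ext_getElem
    · rw [hlenA, hlenB]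
    · intro j hj1 hj2
      have hjN : j < N := by rw [← hlenA]; exact hj1
      have hc := hcells i j hiN hjN
      unfold pvCell at hc
      rw [List.getD_eq_getElem _ _ h1, List.getD_eq_getElem _ _ h2,
        List.getD_eq_getElem _ _ hj1, List.getD_eq_getElem _ _ hj2] at hc
      exact hc

-- ===== VERDICT (by name: the statement is the Claim_ definition above) =====
theorem getDiagram_spec : Claim_equal_getDiagram := by
  intro lp _ hpre
  unfold Spec_getDiagram
  exact main_eq lp hpre
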